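-- pv_equiv track=rewrite | github.com/ArnaudFerre/data-norm | analyzers.py | get_number_of_surface_forms_with_different_labels_in_whole
-- ===== SOURCE A (Python) =====
-- def get_number_of_surface_forms_with_different_labels_in_whole(ddd_data):
--     nb=0
--     nbMentions = 0
--
--     ds_surfaceFormsWithLabels = dict()
--     for foldName in ddd_data.keys():
--         for id in ddd_data[foldName].keys():
--             surfaceForm = ddd_data[foldName][id]["mention"]
--             ds_surfaceFormsWithLabels[surfaceForm] = set()
--
--     for foldName in ddd_data.keys():
--         for id in ddd_data[foldName].keys():
--             surfaceForm = ddd_data[foldName][id]["mention"]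
--             cui = ddd_data[foldName][id]["cui"]
--             ds_surfaceFormsWithLabels[surfaceForm].add(cui)
--
--     for surfaceForm in ds_surfaceFormsWithLabels.keys():
--         if len(ds_surfaceFormsWithLabels[surfaceForm]) > 1:
--             nb+=1
--
--     for foldName in ddd_data.keys():
--         for id in ddd_data[foldName].keys():
--             surfaceForm = ddd_data[foldName][id]["mention"]
--             if len(ds_surfaceFormsWithLabels[surfaceForm]) > 1:
--                 nbMentions+=1
--
--     return nb, nbMentions
-- ===== SOURCE B (Python) =====
-- def get_number_of_surface_forms_with_different_labels_in_whole(ddd_data):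
--     cuis = {}
--     counts = {}
--     for fold in ddd_data.values():
--         for entry in fold.values():
--             sf = entry["mention"]
--             cuis.setdefault(sf, set()).add(entry["cui"])
--             counts[sf] = counts.get(sf, 0) + 1
--     nb = 0
--     nbMentions = 0
--     for sf, s in cuis.items():
--         if len(s) > 1:
--             nb += 1
--             nbMentions += counts[sf]
--     return nb, nbMentions
-- ===== Notes on version B (the rewrite author's own statement) =====
-- stated objective: simpler
-- what changed: B makes one aggregation pass building a surfaceForm->CUI-set dict and a surfaceForm->mention-count dict, then reads nb and nbMentions off those tables, replacing A's four full scans of the data (two dict-building passes, a key scan, and a fourth full re-scan for nbMentions).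
import Mathlib
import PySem

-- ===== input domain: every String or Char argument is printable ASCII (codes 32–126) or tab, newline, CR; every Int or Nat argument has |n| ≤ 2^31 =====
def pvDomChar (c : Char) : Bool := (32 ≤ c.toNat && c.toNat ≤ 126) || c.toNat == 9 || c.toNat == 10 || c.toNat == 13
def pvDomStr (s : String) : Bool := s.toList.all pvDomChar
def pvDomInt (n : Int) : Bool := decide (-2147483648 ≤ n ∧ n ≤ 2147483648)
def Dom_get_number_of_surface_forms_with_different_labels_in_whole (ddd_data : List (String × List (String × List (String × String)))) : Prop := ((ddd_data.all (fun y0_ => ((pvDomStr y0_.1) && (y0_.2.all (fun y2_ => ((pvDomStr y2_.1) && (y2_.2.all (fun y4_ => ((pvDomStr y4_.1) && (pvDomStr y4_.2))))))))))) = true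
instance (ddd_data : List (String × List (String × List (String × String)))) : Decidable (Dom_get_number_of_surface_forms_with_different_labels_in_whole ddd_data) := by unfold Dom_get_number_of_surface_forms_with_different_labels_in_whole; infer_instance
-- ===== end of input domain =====

-- B replaces A's four scans of the data by one aggregation pass building a CUI-set dict and a
-- mention-count dict, then reads both answers off those tables (objective: simpler decomposition).


-- Shared marshalling of the Python argument (a dict of dicts of dicts) into PySem.Dict,
-- duplicate keys collapsing exactly as Python's dict construction does.
def pvToDict (ddd_data : List (String × List (String × List (String × String)))) :
    PySem.Dict String (PySem.Dict String (PySem.Dict String String)) :=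
  PySem.Dict.ofList (ddd_data.map (fun f =>
    (f.1, PySem.Dict.ofList (f.2.map (fun e => (e.1, PySem.Dict.ofList e.2))))))

-- ===== PORT A =====
-- 'e.getD "mention" ""' / 'e.getD "cui" ""' port Python's e["mention"] / e["cui"]: exact under
-- Pre_ (the key is present); lookups keyed by foldName/id always hit (the keys come from the dict).
def get_number_of_surface_forms_with_different_labels_in_whole (ddd_data : List (String × List (String × List (String × String)))) : Int × Int :=
  let ddd := pvToDict ddd_data
  let ds1 : PySem.Dict String (PySem.Set String) :=
    (PySem.Dict.keys ddd).foldl (fun ds foldName =>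
      let fold := ddd.getD foldName PySem.Dict.empty
      (PySem.Dict.keys fold).foldl (fun ds id =>
        let e := fold.getD id PySem.Dict.empty
        ds.insert (e.getD "mention" "") PySem.Set.empty) ds) PySem.Dict.empty
  let ds2 : PySem.Dict String (PySem.Set String) :=
    (PySem.Dict.keys ddd).foldl (fun ds foldName =>
      let fold := ddd.getD foldName PySem.Dict.empty
      (PySem.Dict.keys fold).foldl (fun ds id =>
        let e := fold.getD id PySem.Dict.empty
        ds.modify (e.getD "mention" "") PySem.Set.empty
          (fun s => PySem.Set.add s (e.getD "cui" ""))) ds) ds1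
  let nb : Int :=
    (PySem.Dict.keys ds2).foldl (fun (nb : Int) sf =>
      if 1 < PySem.Set.len (ds2.getD sf PySem.Set.empty) then nb + 1 else nb) 0
  let nbMentions : Int :=
    (PySem.Dict.keys ddd).foldl (fun (n : Int) foldName =>
      let fold := ddd.getD foldName PySem.Dict.empty
      (PySem.Dict.keys fold).foldl (fun (n : Int) id =>
        let e := fold.getD id PySem.Dict.empty
        if 1 < PySem.Set.len (ds2.getD (e.getD "mention" "") PySem.Set.empty)
        then n + 1 else n) n) 0
  (nb, nbMentions)

-- ===== PORT B =====
def get_number_of_surface_forms_with_different_labels_in_whole_alt (ddd_data : List (String × List (String × List (String × String)))) : Int × Int :=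
  let ddd := pvToDict ddd_data
  let st : PySem.Dict String (PySem.Set String) × PySem.Dict String Int :=
    (PySem.Dict.values ddd).foldl (fun st fold =>
      (PySem.Dict.values fold).foldl
        (fun (st : PySem.Dict String (PySem.Set String) × PySem.Dict String Int) e =>
          (st.1.modify (e.getD "mention" "") PySem.Set.empty
             (fun s => PySem.Set.add s (e.getD "cui" "")),
           st.2.insert (e.getD "mention" "") (st.2.getD (e.getD "mention" "") 0 + 1))) st)
      (PySem.Dict.empty, PySem.Dict.empty)
  st.1.items.foldl (fun (p : Int × Int) it =>
    if 1 < PySem.Set.len it.2 then (p.1 + 1, p.2 + st.2.getD it.1 0) else p) (0, 0)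

-- ===== PRECONDITION & SPEC =====
-- Pre_: every mention-entry dict carries the keys "mention" and "cui"; on any other input the
-- Python A raises KeyError (and so does B).
def Pre_get_number_of_surface_forms_with_different_labels_in_whole (ddd_data : List (String × List (String × List (String × String)))) : Prop :=
  (ddd_data.all (fun f => f.2.all (fun e =>
    e.2.any (fun kv => kv.1 == "mention") && e.2.any (fun kv => kv.1 == "cui")))) = true
instance (ddd_data : List (String × List (String × List (String × String)))) : Decidable (Pre_get_number_of_surface_forms_with_different_labels_in_whole ddd_data) := by unfold Pre_get_number_of_surface_forms_with_different_labels_in_whole; infer_instance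

def pvWitness_get_number_of_surface_forms_with_different_labels_in_whole : (List (String × List (String × List (String × String)))) :=
  [("train", [("1", [("mention", "aspirin"), ("cui", "C1")]),
              ("2", [("mention", "aspirin"), ("cui", "C2")])])]

def Spec_get_number_of_surface_forms_with_different_labels_in_whole (ddd_data : List (String × List (String × List (String × String)))) (out : Int × Int) : Prop := out = get_number_of_surface_forms_with_different_labels_in_whole_alt ddd_data
instance (ddd_data : List (String × List (String × List (String × String)))) (out : Int × Int) : Decidable (Spec_get_number_of_surface_forms_with_different_labels_in_whole ddd_data out) := by unfold Spec_get_number_of_surface_forms_with_different_labels_in_whole; infer_instance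

-- ===== CLAIM (what is proved, stated in full; the proofs are below) =====
def Claim_equal_get_number_of_surface_forms_with_different_labels_in_whole : Prop := ∀ (ddd_data : List (String × List (String × List (String × String)))), Dom_get_number_of_surface_forms_with_different_labels_in_whole ddd_data → Pre_get_number_of_surface_forms_with_different_labels_in_whole ddd_data → Spec_get_number_of_surface_forms_with_different_labels_in_whole ddd_data (get_number_of_surface_forms_with_different_labels_in_whole ddd_data)

-- ===== LEMMAS AND PROOFS =====

-- The flattened (mention, cui) pairs, in iteration order, of the marshalled data.
def pvEntries (ddd : PySem.Dict String (PySem.Dict String (PySem.Dict String String))) : List (String × String) :=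
  ddd.items.flatMap (fun f => f.2.items.map (fun e =>
    (e.2.getD "mention" "", e.2.getD "cui" "")))

-- Proof-only names for the flat loops both ports reduce to.
def pvP1 (E : List (String × String)) : PySem.Dict String (PySem.Set String) :=
  E.foldl (fun ds pr => ds.insert pr.1 PySem.Set.empty) PySem.Dict.empty
def pvP2 (E : List (String × String)) (d : PySem.Dict String (PySem.Set String)) :
    PySem.Dict String (PySem.Set String) :=
  E.foldl (fun ds pr => ds.modify pr.1 PySem.Set.empty (fun s => PySem.Set.add s pr.2)) d
def pvCounts (E : List (String × String)) : PySem.Dict String Int :=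
  E.foldl (fun d pr => d.insert pr.1 (d.getD pr.1 0 + 1)) PySem.Dict.empty
def pvNb (d : PySem.Dict String (PySem.Set String)) : Int :=
  (PySem.Dict.keys d).foldl (fun (nb : Int) sf =>
    if 1 < PySem.Set.len (d.getD sf PySem.Set.empty) then nb + 1 else nb) 0
def pvNbM (E : List (String × String)) (d : PySem.Dict String (PySem.Set String)) : Int :=
  E.foldl (fun (n : Int) pr =>
    if 1 < PySem.Set.len (d.getD pr.1 PySem.Set.empty) then n + 1 else n) 0

theorem pv_values_update {κ ν : Type} [BEq κ] [LawfulBEq κ] (ps : List (κ × ν)) :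
    ∀ d : PySem.Dict κ ν, ∀ w ∈ (d.update ps).values, w ∈ d.values ∨ w ∈ ps.map Prod.snd := by
  induction ps with
  | nil => intro d w hw; exact Or.inl (by simpa [PySem.Dict.update] using hw)
  | cons p ps ih =>
    intro d w hw
    rcases ih (d.insert p.1 p.2) w (by simpa [PySem.Dict.update] using hw) with h | h
    · rcases PySem.Dict.mem_values_insert d p.1 p.2 w h with h' | h'
      · exact Or.inr (by simp [h'])
      · exact Or.inl h'
    · exact Or.inr (by simp; right; simpa using h)

theorem pv_hv (ddd_data : List (String × List (String × List (String × String)))) :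
    ∀ fold ∈ (pvToDict ddd_data).values, (PySem.Dict.keys fold).Nodup := by
  intro fold hf
  have h := pv_values_update
    (ddd_data.map (fun f =>
      (f.1, PySem.Dict.ofList (f.2.map (fun e => (e.1, PySem.Dict.ofList e.2))))))
    PySem.Dict.empty fold (by simpa [pvToDict, PySem.Dict.ofList] using hf)
  rcases h with h | h
  · simp [PySem.Dict.empty, PySem.Dict.values] at h
  · simp only [List.map_map, List.mem_map, Function.comp] at h
    obtain ⟨f, _, hf'⟩ := h
    exact hf' ▸ PySem.Dict.nodup_keys_ofList _

theorem pv_insert_const_getD {κ ν : Type} [BEq κ] [LawfulBEq κ] [DecidableEq κ] {β : Type}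
    (l : List β) (key : β → κ) (c : ν) (x : κ) :
    ∀ d : PySem.Dict κ ν, d.getD x c = c →
      (l.foldl (fun d b => d.insert (key b) c) d).getD x c = c := by
  induction l with
  | nil => intro d h; simpa using h
  | cons b l ih =>
    intro d h
    simp only [List.foldl_cons]
    exact ih _ (by rcases eq_or_ne x (key b) with h' | h' <;>
      simp [PySem.Dict.getD_insert, h', h])

theorem pv_modify_getD {κ ν : Type} [BEq κ] [LawfulBEq κ] [DecidableEq κ] {β : Type}
    (l : List β) (key : β → κ) (d0 : ν) (f : β → ν → ν) (x : κ) :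
    ∀ d : PySem.Dict κ ν,
      (l.foldl (fun d b => d.modify (key b) d0 (f b)) d).getD x d0 =
        (l.filter (fun b => key b == x)).foldl (fun v b => f b v) (d.getD x d0) := by
  induction l with
  | nil => intro d; rfl
  | cons b l ih =>
    intro d
    simp only [List.foldl_cons, List.filter_cons]
    rcases eq_or_ne (key b) x with h | h
    · simp [h, ih, PySem.Dict.getD_modify]
    · simp [ih, PySem.Dict.getD_modify, h, Ne.symm h]

theorem pv_sum_ite_eq_count {α : Type} [BEq α] [LawfulBEq α] [DecidableEq α] (s : List α) (x : α) (c : Int) :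
    (s.map (fun k => if k = x then c else 0)).sum = (s.count x : Int) * c := by
  induction s with
  | nil => simp
  | cons a s ih =>
    simp only [List.map_cons, List.sum_cons, ih, List.count_cons]
    rcases eq_or_ne a x with h | h
    · subst h; simp [add_mul]; ring
    · simp [h, Ne.symm h]

theorem pv_sum_group {α : Type} [BEq α] [LawfulBEq α] [DecidableEq α] (p : α → Bool) :
    ∀ ms : List α,
      ((PySem.Set.ofList ms).map (fun k => if p k then (ms.count k : Int) else 0)).sum =
        (ms.map (fun s => if p s then (1 : Int) else 0)).sum := by
  intro ms
  induction ms using List.reverseRecOn with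
  | nil => simp [PySem.Set.ofList_nil]
  | append_singleton ms x ih =>
    have hterm : (fun k => if p k then ((ms ++ [x]).count k : Int) else 0) =
        (fun k => (if p k then (ms.count k : Int) else 0) +
          (if k = x then (if p x then (1 : Int) else 0) else 0)) := by
      funext k
      rcases eq_or_ne k x with h | h
      · subst h; by_cases hp : p k <;> simp [hp, List.count_append]
      · by_cases hp : p k <;> simp [hp, List.count_append, List.count_singleton, h, Ne.symm h]
    rw [PySem.Set.ofList_append_singleton]
    by_cases hx : x ∈ PySem.Set.ofList ms
    · have hxs : (PySem.Set.ofList ms).count x = 1 :=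
        List.count_eq_one_of_mem (PySem.Set.nodup_ofList ms) hx
      rw [PySem.Set.add_of_mem hx, hterm, PySem.List.sum_map_add_int, ih,
        pv_sum_ite_eq_count, hxs]
      simp
    · have hxm : x ∉ ms := fun h => hx ((PySem.Set.mem_ofList _ _).mpr h)
      have hxs : (PySem.Set.ofList ms).count x = 0 := List.count_eq_zero.mpr hx
      rw [PySem.Set.add_of_not_mem hx, List.map_append, List.sum_append, hterm,
        PySem.List.sum_map_add_int, ih, pv_sum_ite_eq_count, hxs]
      by_cases hp : p x <;>
        simp [hp, List.count_append, List.count_eq_zero.mpr hxm]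

-- A's nested key-loops are the flat fold over pvEntries.
theorem pv_loopA {σ : Type}
    (ddd : PySem.Dict String (PySem.Dict String (PySem.Dict String String)))
    (hnd : (PySem.Dict.keys ddd).Nodup)
    (hv : ∀ fold ∈ ddd.values, (PySem.Dict.keys fold).Nodup)
    (g : σ → String × String → σ) (init : σ) :
    ((PySem.Dict.keys ddd).foldl (fun s foldName =>
      (PySem.Dict.keys (ddd.getD foldName PySem.Dict.empty)).foldl (fun s id =>
        g s (((ddd.getD foldName PySem.Dict.empty).getD id PySem.Dict.empty).getD "mention" "",
             ((ddd.getD foldName PySem.Dict.empty).getD id PySem.Dict.empty).getD "cui" "")) s)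
      init) =
    (pvEntries ddd).foldl g init := by
  unfold pvEntries
  rw [List.foldl_flatMap,
    PySem.Dict.items_eq_map_keys ddd hnd PySem.Dict.empty, List.foldl_map]
  refine PySem.List.foldl_congr_mem _ _ _ init (fun s k hk => ?_)
  have hfnd : (PySem.Dict.keys (ddd.getD k PySem.Dict.empty)).Nodup := by
    refine hv _ ?_
    rw [PySem.Dict.values_eq_map_keys ddd hnd PySem.Dict.empty]
    exact List.mem_map_of_mem hk
  rw [List.foldl_map,
    PySem.Dict.items_eq_map_keys (ddd.getD k PySem.Dict.empty) hfnd PySem.Dict.empty,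
    List.foldl_map]

-- B's nested value-loops are the same flat fold over pvEntries.
theorem pv_loopB {σ : Type}
    (ddd : PySem.Dict String (PySem.Dict String (PySem.Dict String String)))
    (hnd : (PySem.Dict.keys ddd).Nodup)
    (hv : ∀ fold ∈ ddd.values, (PySem.Dict.keys fold).Nodup)
    (g : σ → String × String → σ) (init : σ) :
    ((PySem.Dict.values ddd).foldl (fun s fold =>
      (PySem.Dict.values fold).foldl (fun s e =>
        g s (e.getD "mention" "", e.getD "cui" "")) s) init) =
    (pvEntries ddd).foldl g init := by
  unfold pvEntries
  rw [List.foldl_flatMap,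
    PySem.Dict.items_eq_map_keys ddd hnd PySem.Dict.empty, List.foldl_map,
    PySem.Dict.values_eq_map_keys ddd hnd PySem.Dict.empty, List.foldl_map]
  refine PySem.List.foldl_congr_mem _ _ _ init (fun s k hk => ?_)
  have hfnd : (PySem.Dict.keys (ddd.getD k PySem.Dict.empty)).Nodup := by
    refine hv _ ?_
    rw [PySem.Dict.values_eq_map_keys ddd hnd PySem.Dict.empty]
    exact List.mem_map_of_mem hk
  rw [PySem.Dict.values_eq_map_keys (ddd.getD k PySem.Dict.empty) hfnd PySem.Dict.empty,
    List.foldl_map, List.foldl_map,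
    PySem.Dict.items_eq_map_keys (ddd.getD k PySem.Dict.empty) hfnd PySem.Dict.empty,
    List.foldl_map]

theorem pv_A_flat (ddd_data : List (String × List (String × List (String × String)))) :
    get_number_of_surface_forms_with_different_labels_in_whole ddd_data =
      (pvNb (pvP2 (pvEntries (pvToDict ddd_data)) (pvP1 (pvEntries (pvToDict ddd_data)))),
       pvNbM (pvEntries (pvToDict ddd_data))
         (pvP2 (pvEntries (pvToDict ddd_data)) (pvP1 (pvEntries (pvToDict ddd_data))))) := by
  have hnd : (PySem.Dict.keys (pvToDict ddd_data)).Nodup := PySem.Dict.nodup_keys_ofList _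
  have hv := pv_hv ddd_data
  simp only [get_number_of_surface_forms_with_different_labels_in_whole]
  rw [pv_loopA (pvToDict ddd_data) hnd hv
        (fun ds pr => ds.insert pr.1 PySem.Set.empty) PySem.Dict.empty]
  rw [pv_loopA (pvToDict ddd_data) hnd hv
        (fun ds pr => ds.modify pr.1 PySem.Set.empty (fun s => PySem.Set.add s pr.2))
        (List.foldl (fun (ds : PySem.Dict String (PySem.Set String)) (pr : String × String) =>
            ds.insert pr.1 PySem.Set.empty) PySem.Dict.empty (pvEntries (pvToDict ddd_data)))]
  rw [pv_loopA (pvToDict ddd_data) hnd hv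
        (fun (n : Int) pr =>
          if 1 < PySem.Set.len
              ((List.foldl (fun (ds : PySem.Dict String (PySem.Set String)) (pr : String × String) =>
                    ds.modify pr.1 PySem.Set.empty (fun s => PySem.Set.add s pr.2))
                  (List.foldl (fun (ds : PySem.Dict String (PySem.Set String)) (pr : String × String) =>
                      ds.insert pr.1 PySem.Set.empty) PySem.Dict.empty (pvEntries (pvToDict ddd_data)))
                  (pvEntries (pvToDict ddd_data))).getD pr.1 PySem.Set.empty)
          then n + 1 else n) 0]
  rfl

theorem pv_B_flat (ddd_data : List (String × List (String × List (String × String)))) :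
    get_number_of_surface_forms_with_different_labels_in_whole_alt ddd_data =
      (pvP2 (pvEntries (pvToDict ddd_data)) PySem.Dict.empty).items.foldl
        (fun (p : Int × Int) it =>
          if 1 < PySem.Set.len it.2
          then (p.1 + 1, p.2 + (pvCounts (pvEntries (pvToDict ddd_data))).getD it.1 0)
          else p) (0, 0) := by
  have hnd : (PySem.Dict.keys (pvToDict ddd_data)).Nodup := PySem.Dict.nodup_keys_ofList _
  have hv := pv_hv ddd_data
  simp only [get_number_of_surface_forms_with_different_labels_in_whole_alt]
  rw [pv_loopB (pvToDict ddd_data) hnd hv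
        (fun (st : PySem.Dict String (PySem.Set String) × PySem.Dict String Int) pr =>
          (st.1.modify pr.1 PySem.Set.empty (fun s => PySem.Set.add s pr.2),
           st.2.insert pr.1 (st.2.getD pr.1 0 + 1)))
        (PySem.Dict.empty, PySem.Dict.empty)]
  rw [PySem.List.foldl_prod_mk
        (f := fun (d : PySem.Dict String (PySem.Set String)) (pr : String × String) =>
          d.modify pr.1 PySem.Set.empty (fun s => PySem.Set.add s pr.2))
        (g := fun (d : PySem.Dict String Int) (pr : String × String) =>
          d.insert pr.1 (d.getD pr.1 0 + 1))]
  rfl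

theorem pv_counts_getD (E : List (String × String)) (k : String) :
    (pvCounts E).getD k 0 = ((E.map Prod.fst).count k : Int) := by
  unfold pvCounts
  have h := (List.foldl_map (f := Prod.fst)
    (g := fun (d : PySem.Dict String Int) (x : String) => d.insert x (d.getD x 0 + 1))
    (l := E) (init := PySem.Dict.empty)).symm
  rw [h, PySem.Dict.getD_foldl_insert_add_one]
  simp

theorem pv_update_self (ms : List String) :
    PySem.Set.update (PySem.Set.ofList ms) ms = PySem.Set.ofList ms := by
  rw [PySem.Set.update_eq_append_filter]
  have : (PySem.Set.ofList ms).filter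
      (fun y => !(PySem.Set.ofList ms).contains y) = [] := by
    rw [List.filter_eq_nil_iff]
    intro a ha
    simp [ha]
  rw [this, List.append_nil]

theorem pv_ds2_eq (E : List (String × String)) :
    pvP2 E (pvP1 E) = pvP2 E PySem.Dict.empty := by
  have hk1 : (PySem.Dict.keys (pvP1 E)).Nodup := by
    unfold pvP1
    exact PySem.Dict.nodup_keys_foldl_insert_key E Prod.fst
      (fun _ _ => PySem.Set.empty) PySem.Dict.empty (by simp [PySem.Dict.keys_empty])
  have hk2 : (PySem.Dict.keys (pvP2 E (pvP1 E))).Nodup := by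
    unfold pvP2
    exact PySem.Dict.nodup_keys_foldl_modify_key E Prod.fst PySem.Set.empty
      (fun _ pr s => PySem.Set.add s pr.2) (pvP1 E) hk1
  have hk3 : (PySem.Dict.keys (pvP2 E PySem.Dict.empty)).Nodup := by
    unfold pvP2
    exact PySem.Dict.nodup_keys_foldl_modify_key E Prod.fst PySem.Set.empty
      (fun _ pr s => PySem.Set.add s pr.2) PySem.Dict.empty (by simp [PySem.Dict.keys_empty])
  have hkeys1 : PySem.Dict.keys (pvP1 E) = PySem.Set.ofList (E.map Prod.fst) := by
    unfold pvP1
    rw [PySem.Dict.keys_foldl_insert_key E Prod.fst (fun _ _ => PySem.Set.empty)]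
    simp [PySem.Dict.keys_empty, PySem.Set.update_nil_left]
  have hkeysA : PySem.Dict.keys (pvP2 E (pvP1 E)) = PySem.Set.ofList (E.map Prod.fst) := by
    unfold pvP2
    rw [PySem.Dict.keys_foldl_modify_key E Prod.fst PySem.Set.empty
      (fun _ pr s => PySem.Set.add s pr.2), hkeys1, pv_update_self]
  have hkeysB : PySem.Dict.keys (pvP2 E PySem.Dict.empty) = PySem.Set.ofList (E.map Prod.fst) := by
    unfold pvP2
    rw [PySem.Dict.keys_foldl_modify_key E Prod.fst PySem.Set.empty
      (fun _ pr s => PySem.Set.add s pr.2)]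
    simp [PySem.Dict.keys_empty, PySem.Set.update_nil_left]
  have hgetD : ∀ x, (pvP2 E (pvP1 E)).getD x PySem.Set.empty =
      (pvP2 E PySem.Dict.empty).getD x PySem.Set.empty := by
    intro x
    unfold pvP2
    rw [pv_modify_getD E Prod.fst PySem.Set.empty (fun pr s => PySem.Set.add s pr.2) x,
        pv_modify_getD E Prod.fst PySem.Set.empty (fun pr s => PySem.Set.add s pr.2) x]
    have h1 : (pvP1 E).getD x PySem.Set.empty = PySem.Set.empty := by
      unfold pvP1
      exact pv_insert_const_getD E Prod.fst PySem.Set.empty x PySem.Dict.empty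
        (PySem.Dict.getD_empty _ _)
    rw [h1, PySem.Dict.getD_empty]
  apply PySem.Dict.ext
  rw [PySem.Dict.items_eq_map_keys _ hk2 PySem.Set.empty,
      PySem.Dict.items_eq_map_keys _ hk3 PySem.Set.empty, hkeysA, hkeysB]
  exact List.map_congr_left (fun k _ => by rw [hgetD k])

-- Core equality of the two flat computations.
theorem pv_core (E : List (String × String)) :
    (pvNb (pvP2 E (pvP1 E)), pvNbM E (pvP2 E (pvP1 E))) =
      (pvP2 E PySem.Dict.empty).items.foldl
        (fun (p : Int × Int) it =>
          if 1 < PySem.Set.len it.2 then (p.1 + 1, p.2 + (pvCounts E).getD it.1 0) else p)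
        (0, 0) := by
  have hk3 : (PySem.Dict.keys (pvP2 E PySem.Dict.empty)).Nodup := by
    unfold pvP2
    exact PySem.Dict.nodup_keys_foldl_modify_key E Prod.fst PySem.Set.empty
      (fun _ pr s => PySem.Set.add s pr.2) PySem.Dict.empty (by simp [PySem.Dict.keys_empty])
  have hkeysB : PySem.Dict.keys (pvP2 E PySem.Dict.empty) = PySem.Set.ofList (E.map Prod.fst) := by
    unfold pvP2
    rw [PySem.Dict.keys_foldl_modify_key E Prod.fst PySem.Set.empty
      (fun _ pr s => PySem.Set.add s pr.2)]
    simp [PySem.Dict.keys_empty, PySem.Set.update_nil_left]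
  set C := pvP2 E PySem.Dict.empty with hC
  set ms := E.map Prod.fst with hms
  have hsplit : (fun (p : Int × Int) (it : String × PySem.Set String) =>
      if 1 < PySem.Set.len it.2 then (p.1 + 1, p.2 + (pvCounts E).getD it.1 0) else p) =
      (fun p it =>
        ((fun (a : Int) (it : String × PySem.Set String) =>
            if 1 < PySem.Set.len it.2 then a + 1 else a) p.1 it,
         (fun (a : Int) (it : String × PySem.Set String) =>
            if 1 < PySem.Set.len it.2 then a + (pvCounts E).getD it.1 0 else a) p.2 it)) := by
    funext p it
    dsimp only
    split_ifs <;> rfl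
  rw [pv_ds2_eq, hsplit,
      PySem.List.foldl_prod_mk
        (f := fun (a : Int) (it : String × PySem.Set String) =>
          if 1 < PySem.Set.len it.2 then a + 1 else a)
        (g := fun (a : Int) (it : String × PySem.Set String) =>
          if 1 < PySem.Set.len it.2 then a + (pvCounts E).getD it.1 0 else a),
      PySem.Dict.items_eq_map_keys C hk3 PySem.Set.empty, hkeysB,
      List.foldl_map, List.foldl_map]
  refine Prod.ext ?_ ?_
  · -- nb component
    show pvNb C = _
    unfold pvNb
    rw [hkeysB]
  · -- nbMentions component
    show pvNbM E C = _
    unfold pvNbM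
    have hmapE := (List.foldl_map (f := Prod.fst)
      (g := fun (a : Int) (k : String) =>
        if 1 < PySem.Set.len (C.getD k PySem.Set.empty) then a + 1 else a)
      (l := E) (init := (0 : Int))).symm
    rw [hmapE, ← hms]
    have hL : ms.foldl (fun (a : Int) (k : String) =>
        if 1 < PySem.Set.len (C.getD k PySem.Set.empty) then a + 1 else a) 0 =
        (ms.map (fun k =>
          if 1 < PySem.Set.len (C.getD k PySem.Set.empty) then (1 : Int) else 0)).sum := by
      rw [show (fun (a : Int) (k : String) =>
          if 1 < PySem.Set.len (C.getD k PySem.Set.empty) then a + 1 else a) =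
        (fun a k => a + (if 1 < PySem.Set.len (C.getD k PySem.Set.empty) then (1 : Int) else 0))
        from by funext a k; split_ifs <;> simp]
      rw [PySem.List.foldl_add]
      simp
    have hR : (PySem.Set.ofList ms).foldl (fun (a : Int) (k : String) =>
        if 1 < PySem.Set.len (C.getD k PySem.Set.empty) then a + (pvCounts E).getD k 0 else a) 0 =
        ((PySem.Set.ofList ms).map (fun k =>
          if 1 < PySem.Set.len (C.getD k PySem.Set.empty) then (ms.count k : Int) else 0)).sum := by
      rw [show (fun (a : Int) (k : String) =>
          if 1 < PySem.Set.len (C.getD k PySem.Set.empty) then a + (pvCounts E).getD k 0 else a) =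
        (fun a k => a + (if 1 < PySem.Set.len (C.getD k PySem.Set.empty)
          then (ms.count k : Int) else 0)) from by
          funext a k
          rw [pv_counts_getD, ← hms]
          split_ifs <;> simp]
      rw [PySem.List.foldl_add]
      simp
    rw [hL, hR]
    dsimp only
    have hg := pv_sum_group (fun k => decide (1 < PySem.Set.len (C.getD k PySem.Set.empty))) ms
    simp only [decide_eq_true_eq] at hg
    exact hg.symm

-- ===== VERDICT (by name: the statement is the Claim_ definition above) =====
theorem get_number_of_surface_forms_with_different_labels_in_whole_spec : Claim_equal_get_number_of_surface_forms_with_different_labels_in_whole := by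
  intro ddd_data _ _
  unfold Spec_get_number_of_surface_forms_with_different_labels_in_whole
  rw [pv_A_flat, pv_B_flat, pv_core]
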